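-- pv_equiv track=rewrite | github.com/vabsalack/COMPETITIVE-CODING | CSE/CSE330/Recursion/2.0_Stone Division, Revisited.py | stoneDivision
-- ===== SOURCE A (Python) =====
-- def stoneDivision(n, s):
--     # Write your code here
--     memo = {}
--     s.sort()
--
--     def recursion(n, s, memo):
--         if n == 0 or n == 1:
--             return 0
--         if n in memo:
--             return memo[n]
--
--         max_moves = 0
--         for x in s:
--             moves = 0
--
--             if n <= x:
--                 break
--
--             if n != x and n % x == 0:
--                 moves += recursion(x, s, memo) * (n // x) + 1
--
--             max_moves = max(max_moves, moves)
--
--         memo[n] = max_moves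
--         return max_moves
--
--     return recursion(n, s, memo)
-- ===== SOURCE B (Python) =====
-- def stoneDivision(n, s):
--     # Bottom-up DP over the (in-place) sorted pile sizes instead of memoized recursion.
--     # Sorts s in place exactly like the original.
--     s.sort()
--     if n == 0 or n == 1:
--         return 0
--     dp = {}
--     for v in s:
--         if v >= n:
--             break
--         if v == 0 or v == 1:
--             dp[v] = 0
--         else:
--             best = 0
--             for x in s:
--                 if x >= v:
--                     break
--                 if v % x == 0:
--                     best = max(best, dp[x] * (v // x) + 1)
--             dp[v] = best
--     ans = 0
--     for x in s:
--         if x >= n: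
--             break
--         if n % x == 0:
--             ans = max(ans, dp[x] * (n // x) + 1)
--     return ans
-- ===== Notes on version B (the rewrite author's own statement) =====
-- stated objective: alternative
-- what changed: Replaces the memoized top-down recursion with an iterative bottom-up DP: after sorting, a dict dp is filled in increasing value order (each entry a max over its strict divisors already in dp), and the answer for n is read off by one final divisor scan.
import Mathlib
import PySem

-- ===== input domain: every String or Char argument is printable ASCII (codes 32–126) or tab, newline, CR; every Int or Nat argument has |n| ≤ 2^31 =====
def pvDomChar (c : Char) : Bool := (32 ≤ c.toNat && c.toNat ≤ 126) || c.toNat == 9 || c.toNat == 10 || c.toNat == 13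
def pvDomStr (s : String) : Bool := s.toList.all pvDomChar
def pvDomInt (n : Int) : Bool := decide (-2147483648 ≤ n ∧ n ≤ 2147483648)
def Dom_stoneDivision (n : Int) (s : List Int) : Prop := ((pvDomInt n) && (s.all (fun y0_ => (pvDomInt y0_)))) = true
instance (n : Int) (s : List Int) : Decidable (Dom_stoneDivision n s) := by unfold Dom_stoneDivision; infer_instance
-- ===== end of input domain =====

-- B replaces A's memoized top-down recursion by a bottom-up DP over the sorted values (objective: alternative).
-- Both Pythons sort s IN PLACE (s.sort()); the theorems below are about the return value.

-- ===== PORT A =====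
-- inner 'for x in s' loop of recursion(): 'rec' is the recursive call at the next fuel level
def loopA (rec : Int → PySem.Dict Int Int → Int × PySem.Dict Int Int) (n : Int) :
    List Int → PySem.Dict Int Int → Int → Int × PySem.Dict Int Int
  | [], memo, acc => (acc, memo)
  | x :: rest, memo, acc =>
    if n ≤ x then (acc, memo)          -- break
    else
      let p := if n ≠ x ∧ PySem.Int.mod n x = 0 then
                 let q := rec x memo
                 (q.1 * PySem.Int.floordiv n x + 1, q.2)
               else ((0 : Int), memo)
      loopA rec n rest p.2 (max acc p.1)

-- recursion(n, s, memo); the Nat fuel (|s|+1 at the top call) is only a totality device: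
-- the call chain visits strictly decreasing distinct elements of s, so it is never exhausted
def recA (s : List Int) : Nat → Int → PySem.Dict Int Int → Int × PySem.Dict Int Int
  | 0, _, memo => (0, memo)
  | f + 1, n, memo =>
    if n = 0 ∨ n = 1 then (0, memo)
    else
      match PySem.Dict.get? memo n with
      | some v => (v, memo)
      | none =>
        let r := loopA (recA s f) n s memo 0
        (r.1, PySem.Dict.insert r.2 n r.1)

def stoneDivision (n : Int) (s : List Int) : Int :=
  let ss := PySem.List.sorted s (fun x => x) false
  (recA ss (ss.length + 1) n PySem.Dict.empty).1

-- ===== PORT B =====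
-- inner divisor scan: best over x in s (break at x >= v) of dp[x]*(v//x)+1
def bInner (dp : PySem.Dict Int Int) (v : Int) : List Int → Int → Int
  | [], best => best
  | x :: rest, best =>
    if v ≤ x then best                 -- break
    else bInner dp v rest
      (if PySem.Int.mod v x = 0 then
         max best (PySem.Dict.getD dp x 0 * PySem.Int.floordiv v x + 1)
       else best)
-- dp-building loop: for v in s (break at v >= n)  [dp[x] is always present in Python; getD is exact there]
def bDp (s : List Int) (n : Int) : List Int → PySem.Dict Int Int → PySem.Dict Int Int
  | [], dp => dp
  | v :: rest, dp =>
    if n ≤ v then dp                   -- break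
    else bDp s n rest (PySem.Dict.insert dp v (if v = 0 ∨ v = 1 then 0 else bInner dp v s 0))
-- final answer scan: ans over x in s (break at x >= n) of dp[x]*(n//x)+1
def bFinal (dp : PySem.Dict Int Int) (n : Int) : List Int → Int → Int
  | [], ans => ans
  | x :: rest, ans =>
    if n ≤ x then ans                  -- break
    else bFinal dp n rest
      (if PySem.Int.mod n x = 0 then
         max ans (PySem.Dict.getD dp x 0 * PySem.Int.floordiv n x + 1)
       else ans)

def stoneDivision_alt (n : Int) (s : List Int) : Int :=
  let ss := PySem.List.sorted s (fun x => x) false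
  if n = 0 ∨ n = 1 then 0
  else bFinal (bDp ss n ss PySem.Dict.empty) n ss 0

-- ===== PRECONDITION & SPEC =====
-- Pre_ excludes exactly the inputs on which the Python A raises ZeroDivisionError (0 ∈ s and n ≥ 2);
-- Python B raises there too.
def Pre_stoneDivision (n : Int) (s : List Int) : Prop := (0 : Int) ∈ s → n ≤ 1
instance (n : Int) (s : List Int) : Decidable (Pre_stoneDivision n s) := by
  unfold Pre_stoneDivision; infer_instance
def pvWitness_stoneDivision : Int × List Int := (12, [2, 3, 6])

def Spec_stoneDivision (n : Int) (s : List Int) (out : Int) : Prop := out = stoneDivision_alt n s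
instance (n : Int) (s : List Int) (out : Int) : Decidable (Spec_stoneDivision n s out) := by
  unfold Spec_stoneDivision; infer_instance

-- ===== CLAIM (what is proved, stated in full; the proofs are below) =====
def Claim_equal_stoneDivision : Prop := ∀ (n : Int) (s : List Int), Dom_stoneDivision n s → Pre_stoneDivision n s → Spec_stoneDivision n s (stoneDivision n s)

-- ===== LEMMAS AND PROOFS =====

-- the common mathematical recursion both programs compute: a fuel-based reference function
def specLoop (rec : Int → Int) (n : Int) : List Int → Int → Int
  | [], acc => acc
  | x :: rest, acc =>
    if n ≤ x then acc
    else specLoop rec n rest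
      (max acc (if n ≠ x ∧ PySem.Int.mod n x = 0 then rec x * PySem.Int.floordiv n x + 1 else 0))

def Fm (s : List Int) : Nat → Int → Int
  | 0, _ => 0
  | f + 1, n => if n = 0 ∨ n = 1 then 0 else specLoop (Fm s f) n s 0

def cnt (s : List Int) (n : Int) : Nat := (s.filter (fun x => decide (x < n))).length

-- the fuel-free truth value
def Ft (s : List Int) (n : Int) : Int := Fm s (cnt s n + 1) n

lemma cnt_le (s : List Int) (n : Int) : cnt s n ≤ s.length := by
  simpa [cnt] using List.length_filter_le _ s

lemma cnt_cons (a : Int) (t : List Int) (m : Int) :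
    cnt (a :: t) m = cnt t m + (if a < m then 1 else 0) := by
  by_cases h : a < m <;> simp [cnt, h]

lemma cnt_mono {x n : Int} (h : x ≤ n) : ∀ t : List Int, cnt t x ≤ cnt t n := by
  intro t
  induction t with
  | nil => simp [cnt]
  | cons a t ih =>
    rw [cnt_cons, cnt_cons]
    have : (if a < x then (1 : Nat) else 0) ≤ (if a < n then 1 else 0) := by
      split_ifs with h1 h2 <;> omega
    omega

lemma cnt_lt {s : List Int} {x n : Int} (hx : x ∈ s) (hlt : x < n) : cnt s x < cnt s n := by
  induction s with
  | nil => cases hx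
  | cons a t ih =>
    rw [cnt_cons, cnt_cons]
    rcases List.mem_cons.mp hx with rfl | hmem
    · rw [if_neg (lt_irrefl _), if_pos hlt]
      have := cnt_mono hlt.le t
      omega
    · have h1 := ih hmem
      have : (if a < x then (1 : Nat) else 0) ≤ (if a < n then 1 else 0) := by
        split_ifs with h1 h2 <;> omega
      omega

lemma specLoop_congr {rec1 rec2 : Int → Int} {n : Int} :
    ∀ (rest : List Int) (acc : Int),
      (∀ x ∈ rest, x < n → rec1 x = rec2 x) →
      specLoop rec1 n rest acc = specLoop rec2 n rest acc := by
  intro rest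
  induction rest with
  | nil => intro acc _; rfl
  | cons x t ih =>
    intro acc h
    by_cases hb : n ≤ x
    · simp [specLoop, hb]
    · have hx : x < n := lt_of_not_ge hb
      have hx1 : rec1 x = rec2 x := h x (List.mem_cons_self) hx
      simp only [specLoop, if_neg hb, hx1]
      exact ih _ (fun y hy => h y (List.mem_cons_of_mem _ hy))

lemma Fm_canon (s : List Int) : ∀ f, ∀ n : Int, cnt s n < f → Fm s f n = Ft s n := by
  intro f
  induction f using Nat.strong_induction_on with
  | _ f ih =>
    intro n hf
    match f, hf with
    | g + 1, hf =>
      show Fm s (g + 1) n = Fm s (cnt s n + 1) n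
      by_cases hb : n = 0 ∨ n = 1
      · simp [Fm, hb]
      · simp only [Fm, if_neg hb]
        apply specLoop_congr
        intro x hx hlt
        have hcx : cnt s x < cnt s n := cnt_lt hx hlt
        have h1 : Fm s g x = Ft s x := ih g (Nat.lt_succ_self g) x (by omega)
        have h2 : Fm s (cnt s n) x = Ft s x := ih (cnt s n) (by omega) x hcx
        rw [h1, h2]

lemma Ft_unfold (s : List Int) (n : Int) :
    Ft s n = if n = 0 ∨ n = 1 then 0 else specLoop (Ft s) n s 0 := by
  show Fm s (cnt s n + 1) n = _
  by_cases hb : n = 0 ∨ n = 1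
  · simp [Fm, hb]
  · simp only [Fm, if_neg hb]
    apply specLoop_congr
    intro x hx hlt
    exact Fm_canon s (cnt s n) x (cnt_lt hx hlt)

-- A-side memo invariant: every stored value is the truth value
def GoodMemo (s : List Int) (memo : PySem.Dict Int Int) : Prop :=
  ∀ k v, PySem.Dict.get? memo k = some v → v = Ft s k

lemma loopA_correct (s : List Int) (rec : Int → PySem.Dict Int Int → Int × PySem.Dict Int Int)
    (n : Int)
    (hrec : ∀ x memo', x ∈ s → x < n → GoodMemo s memo' →
        (rec x memo').1 = Ft s x ∧ GoodMemo s (rec x memo').2) :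
    ∀ (rest : List Int) (memo : PySem.Dict Int Int) (acc : Int),
      (∀ x ∈ rest, x ∈ s) → GoodMemo s memo →
      (loopA rec n rest memo acc).1 = specLoop (Ft s) n rest acc ∧
        GoodMemo s (loopA rec n rest memo acc).2 := by
  intro rest
  induction rest with
  | nil =>
    intro memo acc _ hm
    refine ⟨?_, hm⟩
    simp [loopA, specLoop]
  | cons x t ih =>
    intro memo acc hsub hm
    by_cases hb : n ≤ x
    · simp only [loopA, specLoop, if_pos hb]
      exact ⟨by trivial, hm⟩
    · have hx : x < n := lt_of_not_ge hb
      have hxs : x ∈ s := hsub x List.mem_cons_self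
      simp only [loopA, specLoop, if_neg hb]
      by_cases hc : n ≠ x ∧ PySem.Int.mod n x = 0
      · obtain ⟨hv, hg⟩ := hrec x memo hxs hx hm
        simp only [if_pos hc, hv]
        exact ih _ _ (fun y hy => hsub y (List.mem_cons_of_mem _ hy)) hg
      · simp only [if_neg hc]
        exact ih _ _ (fun y hy => hsub y (List.mem_cons_of_mem _ hy)) hm

lemma recA_correct (s : List Int) :
    ∀ (f : Nat) (n : Int) (memo : PySem.Dict Int Int), cnt s n < f → GoodMemo s memo →
      (recA s f n memo).1 = Ft s n ∧ GoodMemo s (recA s f n memo).2 := by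
  intro f
  induction f with
  | zero => intro n memo h; omega
  | succ g ih =>
    intro n memo hf hm
    by_cases hb : n = 0 ∨ n = 1
    · refine ⟨?_, by simpa [recA, hb] using hm⟩
      simp [recA, hb, Ft_unfold]
    · simp only [recA, if_neg hb]
      cases hget : PySem.Dict.get? memo n with
      | some v => exact ⟨hm n v hget, hm⟩
      | none =>
        have hloop := loopA_correct s (recA s g) n
          (fun x memo' hxs hx hm' => ih x memo' (by have := cnt_lt hxs hx; omega) hm')
          s memo 0 (fun y hy => hy) hm
        simp only
        constructor
        · rw [hloop.1, Ft_unfold, if_neg hb]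
        · intro k v hk
          rw [PySem.Dict.get?_insert] at hk
          split at hk
          · next heq =>
            cases hk
            subst heq
            rw [hloop.1, Ft_unfold, if_neg hb]
          · exact hloop.2 k v hk

-- B-side: the two scan loops compute specLoop once dp stores truth values below the bound
lemma bInner_eq (s : List Int) (dp : PySem.Dict Int Int) (v : Int)
    (hdp : ∀ x ∈ s, x < v → PySem.Dict.getD dp x 0 = Ft s x) :
    ∀ (rest : List Int) (best : Int), (∀ x ∈ rest, x ∈ s) → 0 ≤ best →
      bInner dp v rest best = specLoop (Ft s) v rest best := by
  intro rest
  induction rest with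
  | nil => intro best _ _; rfl
  | cons x t ih =>
    intro best hsub hb0
    by_cases hb : v ≤ x
    · simp [bInner, specLoop, hb]
    · have hx : x < v := lt_of_not_ge hb
      have hxs : x ∈ s := hsub x List.mem_cons_self
      have hne : v ≠ x := by omega
      simp only [bInner, specLoop, if_neg hb]
      by_cases hmod : PySem.Int.mod v x = 0
      · rw [hdp x hxs hx, if_pos hmod,
            if_pos (show v ≠ x ∧ PySem.Int.mod v x = 0 from ⟨hne, hmod⟩)]
        exact ih _ (fun y hy => hsub y (List.mem_cons_of_mem _ hy)) (le_trans hb0 (le_max_left _ _))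
      · rw [if_neg hmod, if_neg (show ¬(v ≠ x ∧ PySem.Int.mod v x = 0) from fun h => hmod h.2),
            max_eq_left hb0]
        exact ih _ (fun y hy => hsub y (List.mem_cons_of_mem _ hy)) hb0

lemma bFinal_eq (s : List Int) (dp : PySem.Dict Int Int) (n : Int)
    (hdp : ∀ x ∈ s, x < n → PySem.Dict.getD dp x 0 = Ft s x) :
    ∀ (rest : List Int) (ans : Int), (∀ x ∈ rest, x ∈ s) → 0 ≤ ans →
      bFinal dp n rest ans = specLoop (Ft s) n rest ans := by
  intro rest
  induction rest with
  | nil => intro ans _ _; rfl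
  | cons x t ih =>
    intro ans hsub hb0
    by_cases hb : n ≤ x
    · simp [bFinal, specLoop, hb]
    · have hx : x < n := lt_of_not_ge hb
      have hxs : x ∈ s := hsub x List.mem_cons_self
      have hne : n ≠ x := by omega
      simp only [bFinal, specLoop, if_neg hb]
      by_cases hmod : PySem.Int.mod n x = 0
      · rw [hdp x hxs hx, if_pos hmod,
            if_pos (show n ≠ x ∧ PySem.Int.mod n x = 0 from ⟨hne, hmod⟩)]
        exact ih _ (fun y hy => hsub y (List.mem_cons_of_mem _ hy)) (le_trans hb0 (le_max_left _ _))
      · rw [if_neg hmod, if_neg (show ¬(n ≠ x ∧ PySem.Int.mod n x = 0) from fun h => hmod h.2),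
            max_eq_left hb0]
        exact ih _ (fun y hy => hsub y (List.mem_cons_of_mem _ hy)) hb0

lemma bDp_correct (s : List Int) (n : Int) :
    ∀ (rest : List Int) (dp : PySem.Dict Int Int),
      (∀ x ∈ rest, x ∈ s) → rest.Pairwise (· ≤ ·) →
      (∀ x ∈ s, x < n → x ∈ rest ∨ PySem.Dict.getD dp x 0 = Ft s x) →
      ∀ x ∈ s, x < n → PySem.Dict.getD (bDp s n rest dp) x 0 = Ft s x := by
  intro rest
  induction rest with
  | nil =>
    intro dp _ _ hinv x hxs hxn
    rcases hinv x hxs hxn with h | h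
    · cases h
    · exact h
  | cons v t ih =>
    intro dp hsub hpw hinv x hxs hxn
    by_cases hb : n ≤ v
    · simp only [bDp, if_pos hb]
      rcases hinv x hxs hxn with h | h
      · rcases List.mem_cons.mp h with rfl | hmem
        · omega
        · have : v ≤ x := (List.pairwise_cons.mp hpw).1 x hmem
          omega
      · exact h
    · have hvn : v < n := lt_of_not_ge hb
      simp only [bDp, if_neg hb]
      have hval : (if v = 0 ∨ v = 1 then (0 : Int) else bInner dp v s 0) = Ft s v := by
        by_cases hvb : v = 0 ∨ v = 1
        · simp [hvb, Ft_unfold]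
        · have hd : ∀ y ∈ s, y < v → PySem.Dict.getD dp y 0 = Ft s y := by
            intro y hys hyv
            rcases hinv y hys (lt_trans hyv hvn) with h | h
            · rcases List.mem_cons.mp h with rfl | hmem
              · omega
              · have : v ≤ y := (List.pairwise_cons.mp hpw).1 y hmem
                omega
            · exact h
          rw [if_neg hvb, bInner_eq s dp v hd s 0 (fun y hy => hy) le_rfl, Ft_unfold s v, if_neg hvb]
      apply ih _ (fun y hy => hsub y (List.mem_cons_of_mem _ hy)) (List.pairwise_cons.mp hpw).2
        ?_ x hxs hxn
      intro y hys hyn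
      rcases hinv y hys hyn with h | h
      · rcases List.mem_cons.mp h with rfl | hmem
        · right; rw [PySem.Dict.getD_insert]; simp [hval]
        · left; exact hmem
      · right
        rw [PySem.Dict.getD_insert]
        split
        · next heq => subst heq; exact hval
        · exact h

-- ===== VERDICT (by name: the statement is the Claim_ definition above) =====
theorem stoneDivision_spec : Claim_equal_stoneDivision := by
  intro n s _ _
  unfold Spec_stoneDivision stoneDivision stoneDivision_alt
  set ss := PySem.List.sorted s (fun x => x) false with hss
  by_cases hb : n = 0 ∨ n = 1
  · simp [recA, hb]
  · have hemp : GoodMemo ss PySem.Dict.empty := by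
      intro k v hk; rw [PySem.Dict.get?_empty] at hk; cases hk
    have hcnt : cnt ss n < ss.length + 1 := Nat.lt_succ_of_le (cnt_le ss n)
    have hA := (recA_correct ss (ss.length + 1) n PySem.Dict.empty hcnt hemp).1
    have hpw : ss.Pairwise (· ≤ ·) := by
      simpa using PySem.List.sorted_pairwise (xs := s) (key := fun x => x)
    have hdp := bDp_correct ss n ss PySem.Dict.empty (fun y hy => hy) hpw
      (fun x hx _ => Or.inl hx)
    have hB := bFinal_eq ss (bDp ss n ss PySem.Dict.empty) n hdp ss 0 (fun y hy => hy) le_rfl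
    simp only [if_neg hb]
    rw [hA, hB, Ft_unfold, if_neg hb]
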